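-- pv_equiv track=rewrite | github.com/BeomGooon/For_Baekjoon | Python/백준/Silver/9184. 신나는 함수 실행/신나는 함수 실행.py | check
-- ===== SOURCE A (Python) =====
-- db = [[[0 for _ in range(21)] for _ in range(21)] for _ in range(21)]
--
-- def check(x, y, z):
--     if (x < 1 or y < 1 or z < 1):
--         return 1
--     elif (x > 20 or y > 20 or z > 20):
--         return check(20,20,20)
--     elif db[x][y][z] != 0:
--         return db[x][y][z]
--     elif (x < y and y < z):
--         db[x][y][z] = check(x,y,z-1) + check(x,y-1,z-1) - check(x,y-1,z)
--         return db[x][y][z]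
--     else:
--         db[x][y][z] = check(x-1,y,z) + check(x-1,y,z-1) + check(x-1,y-1,z) - check(x-1,y-1,z-1)
--         return db[x][y][z]
-- ===== SOURCE B (Python) =====
-- def _build():
--     db = [[[0] * 21 for _ in range(21)] for _ in range(21)]
--
--     def g(a, b, c):
--         return 1 if (a < 1 or b < 1 or c < 1) else db[a][b][c]
--
--     for x in range(1, 21):
--         for y in range(1, 21):
--             for z in range(1, 21):
--                 if x < y and y < z:
--                     db[x][y][z] = g(x, y, z - 1) + g(x, y - 1, z - 1) - g(x, y - 1, z)
--                 else:
--                     db[x][y][z] = (g(x - 1, y, z) + g(x - 1, y, z - 1)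
--                                    + g(x - 1, y - 1, z) - g(x - 1, y - 1, z - 1))
--     return db
--
--
-- _DB = _build()
--
--
-- def check(x, y, z):
--     if x < 1 or y < 1 or z < 1:
--         return 1
--     if x > 20 or y > 20 or z > 20:
--         return _DB[20][20][20]
--     return _DB[x][y][z]
-- ===== Notes on version B (the rewrite author's own statement) =====
-- stated objective: alternative
-- what changed: Replaces the memoized top-down recursion on a mutable global table with a bottom-up tabulation: three nested loops fill the 20x20x20 table once at module load, and check becomes a pure clamp-and-lookup with no recursion.
import Mathlib
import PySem

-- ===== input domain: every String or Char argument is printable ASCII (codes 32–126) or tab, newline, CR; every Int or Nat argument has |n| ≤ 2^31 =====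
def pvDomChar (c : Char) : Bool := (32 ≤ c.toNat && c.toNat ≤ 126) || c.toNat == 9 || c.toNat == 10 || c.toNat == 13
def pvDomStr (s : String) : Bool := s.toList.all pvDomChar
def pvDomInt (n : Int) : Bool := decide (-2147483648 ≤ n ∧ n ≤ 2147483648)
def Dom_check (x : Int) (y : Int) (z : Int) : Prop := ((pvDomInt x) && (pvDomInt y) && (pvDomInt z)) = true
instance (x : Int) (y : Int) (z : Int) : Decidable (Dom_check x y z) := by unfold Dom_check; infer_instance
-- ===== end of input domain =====

-- B replaces A's memoized top-down recursion by a bottom-up tabulation (fill the 1..20 cube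
-- once, then clamp-and-lookup); A mutates a module-level memo table, so the equivalence proved
-- here is about the RETURN value (the port threads a fresh memo per call, which yields the
-- same values since the memo only ever holds already-correct entries).

-- ===== PORT A =====
-- A's global 3-d list `db` of zeros is represented as a total map (Int×Int×Int) → Int that is 0
-- where unwritten; the recursion threads it exactly as Python's statements mutate it.
-- fuel makes the recursion structural; `check` passes fuel strictly above the call-tree
-- depth bound (proved sufficient in checkM_correct below), so the 0-fuel branch is never hit
def checkM (fuel : Nat) (db : Std.HashMap (Int × Int × Int) Int) (x : Int) (y : Int) (z : Int) :
    Int × Std.HashMap (Int × Int × Int) Int :=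
  match fuel with
  | 0 => (0, db)
  | fuel + 1 =>
    if x < 1 ∨ y < 1 ∨ z < 1 then (1, db)
    else if 20 < x ∨ 20 < y ∨ 20 < z then checkM fuel db 20 20 20
    else if db.getD (x, y, z) 0 ≠ 0 then (db.getD (x, y, z) 0, db)
    else if x < y ∧ y < z then
      let p1 := checkM fuel db x y (z - 1)
      let p2 := checkM fuel p1.2 x (y - 1) (z - 1)
      let p3 := checkM fuel p2.2 x (y - 1) z
      let v := p1.1 + p2.1 - p3.1
      (v, p3.2.insert (x, y, z) v)
    else
      let p1 := checkM fuel db (x - 1) y z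
      let p2 := checkM fuel p1.2 (x - 1) y (z - 1)
      let p3 := checkM fuel p2.2 (x - 1) (y - 1) z
      let p4 := checkM fuel p3.2 (x - 1) (y - 1) (z - 1)
      let v := p1.1 + p2.1 + p3.1 - p4.1
      (v, p4.2.insert (x, y, z) v)

def check (x : Int) (y : Int) (z : Int) : Int :=
  (checkM (62 + x.toNat + y.toNat + z.toNat) ∅ x y z).1

-- ===== PORT B =====
-- Source B's helper g: read the table, any index below 1 gives 1
def bGet (db : Std.HashMap (Int × Int × Int) Int) (a : Int) (b : Int) (c : Int) : Int :=
  if a < 1 ∨ b < 1 ∨ c < 1 then 1 else db.getD (a, b, c) 0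

-- the body of Source B's innermost loop: fill cell (x,y,z)
def bStep (db : Std.HashMap (Int × Int × Int) Int) (x : Int) (y : Int) (z : Int) :
    Std.HashMap (Int × Int × Int) Int :=
  let v :=
    if x < y ∧ y < z then
      bGet db x y (z - 1) + bGet db x (y - 1) (z - 1) - bGet db x (y - 1) z
    else
      bGet db (x - 1) y z + bGet db (x - 1) y (z - 1)
        + bGet db (x - 1) (y - 1) z - bGet db (x - 1) (y - 1) (z - 1)
  db.insert (x, y, z) v

-- Source B's _build(): three nested for-loops over range(1, 21)
def bTable : Std.HashMap (Int × Int × Int) Int :=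
  (PySem.List.pyRange 1 21 1).foldl
    (fun db x =>
      (PySem.List.pyRange 1 21 1).foldl
        (fun db y =>
          (PySem.List.pyRange 1 21 1).foldl (fun db z => bStep db x y z) db)
        db)
    ∅

def check_alt (x : Int) (y : Int) (z : Int) : Int :=
  if x < 1 ∨ y < 1 ∨ z < 1 then 1
  else if 20 < x ∨ 20 < y ∨ 20 < z then bTable.getD (20, 20, 20) 0
  else bTable.getD (x, y, z) 0

-- ===== PRECONDITION & SPEC =====
def Spec_check (x : Int) (y : Int) (z : Int) (out : Int) : Prop := out = check_alt x y z
instance (x : Int) (y : Int) (z : Int) (out : Int) : Decidable (Spec_check x y z out) := by unfold Spec_check; infer_instance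

-- ===== CLAIM (what is proved, stated in full; the proofs are below) =====
def Claim_equal_check : Prop := ∀ (x : Int) (y : Int) (z : Int), Dom_check x y z → Spec_check x y z (check x y z)

-- ===== LEMMAS AND PROOFS =====

-- the pure value function both programs compute
def W (x : Int) (y : Int) (z : Int) : Int :=
  if x < 1 ∨ y < 1 ∨ z < 1 then 1
  else if 20 < x ∨ 20 < y ∨ 20 < z then W 20 20 20
  else if x < y ∧ y < z then
    W x y (z - 1) + W x (y - 1) (z - 1) - W x (y - 1) z
  else
    W (x - 1) y z + W (x - 1) y (z - 1) + W (x - 1) (y - 1) z - W (x - 1) (y - 1) (z - 1)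
termination_by ((if 20 < x ∨ 20 < y ∨ 20 < z then 61 else 0) + x.toNat + y.toNat + z.toNat : Nat)
decreasing_by all_goals (simp_all; first | omega | (split_ifs <;> omega))

-- every nonzero memo entry is correct
def Good (db : Std.HashMap (Int × Int × Int) Int) : Prop :=
  ∀ t : Int × Int × Int, db.getD t 0 ≠ 0 → db.getD t 0 = W t.1 t.2.1 t.2.2

theorem checkM_correct (fuel : Nat) (db : Std.HashMap (Int × Int × Int) Int) (x y z : Int) :
    Good db → (if 20 < x ∨ 20 < y ∨ 20 < z then 61 else 0) + x.toNat + y.toNat + z.toNat < fuel →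
      (checkM fuel db x y z).1 = W x y z ∧ Good (checkM fuel db x y z).2 := by
  fun_induction checkM fuel db x y z with
  | case1 db x y z =>
    intro _ hm
    simp at hm
  | case2 db x y z fuel h1 =>
    intro hg _
    refine ⟨?_, hg⟩
    rw [W.eq_def]
    simp [h1]
  | case3 db x y z fuel h1 h2 ih =>
    intro hg hm
    have hm' : ((if 20 < (20:Int) ∨ 20 < (20:Int) ∨ 20 < (20:Int) then 61 else 0)
        + (20:Int).toNat + (20:Int).toNat + (20:Int).toNat : Nat) < fuel := by
      rw [if_pos h2] at hm
      rw [if_neg (by omega)]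
      omega
    refine ⟨?_, (ih hg hm').2⟩
    rw [(ih hg hm').1]
    conv_rhs => rw [W.eq_def]
    simp [h1, h2]
  | case4 db x y z fuel h1 h2 h3 =>
    intro hg _
    exact ⟨hg (x, y, z) h3, hg⟩
  | case5 db x y z fuel h1 h2 h3 h4 p1 p2 p3 v iha ihb ihc =>
    intro hg hm
    rw [if_neg h2] at hm
    have hb : ∀ a b c : Int, a ≤ x → b ≤ y → c ≤ z → a + b + c < x + y + z →
        (if 20 < a ∨ 20 < b ∨ 20 < c then 61 else 0) + a.toNat + b.toNat + c.toNat < fuel := by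
      intro a b c ha hbb hcc hs
      rw [if_neg (by omega)]
      omega
    obtain ⟨v1, g1⟩ := iha hg (hb x y (z - 1) le_rfl le_rfl (by omega) (by omega))
    obtain ⟨v2, g2⟩ := ihb g1 (hb x (y - 1) (z - 1) le_rfl (by omega) (by omega) (by omega))
    obtain ⟨v3, g3⟩ := ihc g2 (hb x (y - 1) z le_rfl (by omega) le_rfl (by omega))
    have hval : (checkM fuel db x y (z - 1)).1
        + (checkM fuel (checkM fuel db x y (z - 1)).2 x (y - 1) (z - 1)).1
        - (checkM fuel (checkM fuel (checkM fuel db x y (z - 1)).2 x (y - 1) (z - 1)).2 x (y - 1) z).1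
        = W x y z := by
      rw [v1, v2, v3]
      conv_rhs => rw [W.eq_def]
      simp [h1, h2, h4]
    refine ⟨hval, ?_⟩
    intro t ht
    rw [Std.HashMap.getD_insert] at ht ⊢
    by_cases he : (((x, y, z) : Int × Int × Int) == t)
    · obtain rfl := beq_iff_eq.mp he
      rw [if_pos he]
      simpa using hval
    · rw [if_neg he] at ht ⊢
      exact g3 t ht
  | case6 db x y z fuel h1 h2 h3 h4 p1 p2 p3 p4 v iha ihb ihc ihd =>
    intro hg hm
    rw [if_neg h2] at hm
    have hb : ∀ a b c : Int, a ≤ x → b ≤ y → c ≤ z → a + b + c < x + y + z →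
        (if 20 < a ∨ 20 < b ∨ 20 < c then 61 else 0) + a.toNat + b.toNat + c.toNat < fuel := by
      intro a b c ha hbb hcc hs
      rw [if_neg (by omega)]
      omega
    obtain ⟨v1, g1⟩ := iha hg (hb (x - 1) y z (by omega) le_rfl le_rfl (by omega))
    obtain ⟨v2, g2⟩ := ihb g1 (hb (x - 1) y (z - 1) (by omega) le_rfl (by omega) (by omega))
    obtain ⟨v3, g3⟩ := ihc g2 (hb (x - 1) (y - 1) z (by omega) (by omega) le_rfl (by omega))
    obtain ⟨v4, g4⟩ := ihd g3 (hb (x - 1) (y - 1) (z - 1) (by omega) (by omega) (by omega) (by omega))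
    have hval : (checkM fuel db (x - 1) y z).1
        + (checkM fuel (checkM fuel db (x - 1) y z).2 (x - 1) y (z - 1)).1
        + (checkM fuel (checkM fuel (checkM fuel db (x - 1) y z).2 (x - 1) y (z - 1)).2 (x - 1) (y - 1) z).1
        - (checkM fuel (checkM fuel (checkM fuel (checkM fuel db (x - 1) y z).2 (x - 1) y (z - 1)).2 (x - 1) (y - 1) z).2 (x - 1) (y - 1) (z - 1)).1
        = W x y z := by
      rw [v1, v2, v3, v4]
      conv_rhs => rw [W.eq_def]
      simp [h1, h2, h4]
    refine ⟨hval, ?_⟩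
    intro t ht
    rw [Std.HashMap.getD_insert] at ht ⊢
    by_cases he : (((x, y, z) : Int × Int × Int) == t)
    · obtain rfl := beq_iff_eq.mp he
      rw [if_pos he]
      simpa using hval
    · rw [if_neg he] at ht ⊢
      exact g4 t ht

-- in-range cells lex-before the cursor hold W, the rest are 0
def InRange (t : Int × Int × Int) : Prop :=
  1 ≤ t.1 ∧ t.1 ≤ 20 ∧ 1 ≤ t.2.1 ∧ t.2.1 ≤ 20 ∧ 1 ≤ t.2.2 ∧ t.2.2 ≤ 20

def Before (a b c : Int) (t : Int × Int × Int) : Prop :=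
  t.1 < a ∨ (t.1 = a ∧ (t.2.1 < b ∨ (t.2.1 = b ∧ t.2.2 < c)))

theorem before_mk (a b c t1 t2 t3 : Int) :
    Before a b c (t1, t2, t3) ↔ (t1 < a ∨ (t1 = a ∧ (t2 < b ∨ (t2 = b ∧ t3 < c)))) := Iff.rfl

theorem inRange_mk (t1 t2 t3 : Int) :
    InRange (t1, t2, t3) ↔ (1 ≤ t1 ∧ t1 ≤ 20 ∧ 1 ≤ t2 ∧ t2 ≤ 20 ∧ 1 ≤ t3 ∧ t3 ≤ 20) := Iff.rfl

def Done (a b c : Int) (db : Std.HashMap (Int × Int × Int) Int) : Prop :=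
  ∀ t : Int × Int × Int, InRange t →
    (Before a b c t → db.getD t 0 = W t.1 t.2.1 t.2.2) ∧ (¬ Before a b c t → db.getD t 0 = 0)

theorem done_congr {a b c a' b' c' : Int} {db : Std.HashMap (Int × Int × Int) Int}
    (h : Done a b c db)
    (he : ∀ t : Int × Int × Int, InRange t → (Before a b c t ↔ Before a' b' c' t)) :
    Done a' b' c' db := by
  intro t ht
  rcases h t ht with ⟨h1, h2⟩
  exact ⟨fun hb => h1 ((he t ht).mpr hb), fun hb => h2 (fun hb' => hb ((he t ht).mp hb'))⟩

theorem bGet_eq_W {x y z : Int} {db : Std.HashMap (Int × Int × Int) Int} (h : Done x y z db)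
    (a b c : Int) (ha : a ≤ 20) (hb : b ≤ 20) (hc : c ≤ 20)
    (hbef : 1 ≤ a → 1 ≤ b → 1 ≤ c → Before x y z (a, b, c)) :
    bGet db a b c = W a b c := by
  unfold bGet
  by_cases hg : a < 1 ∨ b < 1 ∨ c < 1
  · rw [if_pos hg, W.eq_def, if_pos hg]
  · rw [if_neg hg]
    exact (h (a, b, c) (by rw [inRange_mk]; omega)).1
      (hbef (by omega) (by omega) (by omega))

theorem bStep_correct {x y z : Int} {db : Std.HashMap (Int × Int × Int) Int}
    (hx : 1 ≤ x ∧ x ≤ 20) (hy : 1 ≤ y ∧ y ≤ 20) (hz : 1 ≤ z ∧ z ≤ 20)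
    (h : Done x y z db) : Done x y (z + 1) (bStep db x y z) := by
  have hval : (bStep db x y z).getD (x, y, z) 0 = W x y z := by
    unfold bStep
    rw [Std.HashMap.getD_insert, if_pos (beq_self_eq_true _)]
    by_cases hc : x < y ∧ y < z
    · rw [if_pos hc,
        bGet_eq_W h x y (z - 1) (by omega) (by omega) (by omega)
          (by intros; rw [before_mk]; omega),
        bGet_eq_W h x (y - 1) (z - 1) (by omega) (by omega) (by omega)
          (by intros; rw [before_mk]; omega),
        bGet_eq_W h x (y - 1) z (by omega) (by omega) (by omega)
          (by intros; rw [before_mk]; omega)]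
      conv_rhs => rw [W.eq_def]
      rw [if_neg (by omega), if_neg (by omega), if_pos hc]
    · rw [if_neg hc,
        bGet_eq_W h (x - 1) y z (by omega) (by omega) (by omega)
          (by intros; rw [before_mk]; omega),
        bGet_eq_W h (x - 1) y (z - 1) (by omega) (by omega) (by omega)
          (by intros; rw [before_mk]; omega),
        bGet_eq_W h (x - 1) (y - 1) z (by omega) (by omega) (by omega)
          (by intros; rw [before_mk]; omega),
        bGet_eq_W h (x - 1) (y - 1) (z - 1) (by omega) (by omega) (by omega)
          (by intros; rw [before_mk]; omega)]
      conv_rhs => rw [W.eq_def]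
      rw [if_neg (by omega), if_neg (by omega), if_neg hc]
  intro t ht
  by_cases he : t = (x, y, z)
  · subst he
    refine ⟨fun _ => hval, fun hb => absurd ?_ hb⟩
    rw [before_mk]
    omega
  · obtain ⟨t1, t2, t3⟩ := t
    have he' : ¬(t1 = x ∧ t2 = y ∧ t3 = z) := by
      intro ⟨e1, e2, e3⟩; exact he (by rw [e1, e2, e3])
    have hstep : (bStep db x y z).getD (t1, t2, t3) 0 = db.getD (t1, t2, t3) 0 := by
      unfold bStep
      rw [Std.HashMap.getD_insert, if_neg (by simpa [beq_iff_eq] using fun e1 e2 e3 => he' ⟨e1.symm, e2.symm, e3.symm⟩)]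
    have hbefiff : Before x y (z + 1) (t1, t2, t3) ↔ Before x y z (t1, t2, t3) := by
      rw [before_mk, before_mk]; omega
    rw [hstep, hbefiff]
    exact h (t1, t2, t3) ht

theorem zfold_correct (n : Nat) : ∀ (c x y : Int) (db : Std.HashMap (Int × Int × Int) Int),
    n ≤ 20 → c = 21 - (n : Int) → 1 ≤ x ∧ x ≤ 20 → 1 ≤ y ∧ y ≤ 20 → Done x y c db →
    Done x y 21 ((PySem.List.pyRange c 21 1).foldl (fun db z => bStep db x y z) db) := by
  induction n with
  | zero =>
    intro c x y db _ hc hx hy hd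
    rw [PySem.List.pyRange_one_eq_nil (show (21 : Int) ≤ c by omega)]
    rw [show c = (21 : Int) by omega] at hd
    exact hd
  | succ n ih =>
    intro c x y db hn hc hx hy hd
    rw [PySem.List.pyRange_one_cons (show c < (21 : Int) by omega)]
    simp only [List.foldl_cons]
    exact ih (c + 1) x y (bStep db x y c) (by omega) (by push_cast at hc ⊢; omega) hx hy
      (bStep_correct hx hy (by omega) hd)

theorem yfold_correct (n : Nat) : ∀ (b x : Int) (db : Std.HashMap (Int × Int × Int) Int),
    n ≤ 20 → b = 21 - (n : Int) → 1 ≤ x ∧ x ≤ 20 → Done x b 1 db →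
    Done x 21 1 ((PySem.List.pyRange b 21 1).foldl
      (fun db y => (PySem.List.pyRange 1 21 1).foldl (fun db z => bStep db x y z) db) db) := by
  induction n with
  | zero =>
    intro b x db _ hb hx hd
    rw [PySem.List.pyRange_one_eq_nil (show (21 : Int) ≤ b by omega)]
    rw [show b = (21 : Int) by omega] at hd
    exact hd
  | succ n ih =>
    intro b x db hn hb hx hd
    rw [PySem.List.pyRange_one_cons (show b < (21 : Int) by omega)]
    simp only [List.foldl_cons]
    have hz : Done x b 21 ((PySem.List.pyRange 1 21 1).foldl (fun db z => bStep db x b z) db) :=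
      zfold_correct 20 1 x b db (by omega) (by norm_num) hx (by omega) hd
    refine ih (b + 1) x _ (by omega) (by push_cast at hb ⊢; omega) hx
      (done_congr hz ?_)
    intro t ht
    obtain ⟨t1, t2, t3⟩ := t
    rw [inRange_mk] at ht
    rw [before_mk, before_mk]
    omega

theorem xfold_correct (n : Nat) : ∀ (a : Int) (db : Std.HashMap (Int × Int × Int) Int),
    n ≤ 20 → a = 21 - (n : Int) → Done a 1 1 db →
    Done 21 1 1 ((PySem.List.pyRange a 21 1).foldl
      (fun db x => (PySem.List.pyRange 1 21 1).foldl
        (fun db y => (PySem.List.pyRange 1 21 1).foldl (fun db z => bStep db x y z) db) db) db) := by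
  induction n with
  | zero =>
    intro a db _ ha hd
    rw [PySem.List.pyRange_one_eq_nil (show (21 : Int) ≤ a by omega)]
    rw [show a = (21 : Int) by omega] at hd
    exact hd
  | succ n ih =>
    intro a db hn ha hd
    rw [PySem.List.pyRange_one_cons (show a < (21 : Int) by omega)]
    simp only [List.foldl_cons]
    have hy : Done a 21 1 ((PySem.List.pyRange 1 21 1).foldl
        (fun db y => (PySem.List.pyRange 1 21 1).foldl (fun db z => bStep db a y z) db) db) :=
      yfold_correct 20 1 a db (by omega) (by norm_num) (by omega) hd
    refine ih (a + 1) _ (by omega) (by push_cast at ha ⊢; omega) (done_congr hy ?_)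
    intro t ht
    obtain ⟨t1, t2, t3⟩ := t
    rw [inRange_mk] at ht
    rw [before_mk, before_mk]
    omega

theorem bTable_eq_W (t : Int × Int × Int) (ht : InRange t) :
    bTable.getD t 0 = W t.1 t.2.1 t.2.2 := by
  have h0 : Done 1 1 1 (∅ : Std.HashMap (Int × Int × Int) Int) := by
    intro t ht
    obtain ⟨t1, t2, t3⟩ := t
    rw [inRange_mk] at ht
    refine ⟨fun hb => absurd hb ?_, fun _ => by simp⟩
    rw [before_mk]
    omega
  have hdone : Done 21 1 1 bTable := by
    unfold bTable
    exact xfold_correct 20 1 ∅ (by omega) (by norm_num) h0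
  obtain ⟨t1, t2, t3⟩ := t
  rw [inRange_mk] at ht
  exact (hdone (t1, t2, t3) (by rw [inRange_mk]; omega)).1 (by rw [before_mk]; omega)

theorem check_alt_eq_W (x y z : Int) : check_alt x y z = W x y z := by
  unfold check_alt
  by_cases h1 : x < 1 ∨ y < 1 ∨ z < 1
  · rw [if_pos h1, W.eq_def, if_pos h1]
  · rw [if_neg h1]
    by_cases h2 : 20 < x ∨ 20 < y ∨ 20 < z
    · rw [if_pos h2]
      conv_rhs => rw [W.eq_def]
      rw [if_neg h1, if_pos h2]
      exact bTable_eq_W (20, 20, 20) (by rw [inRange_mk]; omega)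
    · rw [if_neg h2]
      exact bTable_eq_W (x, y, z) (by rw [inRange_mk]; omega)

-- ===== VERDICT (by name: the statement is the Claim_ definition above) =====
theorem check_spec : Claim_equal_check := by
  intro x y z _
  unfold Spec_check check
  rw [check_alt_eq_W]
  exact (checkM_correct (62 + x.toNat + y.toNat + z.toNat) ∅ x y z
    (fun t h => absurd (by simp) h) (by split_ifs <;> omega)).1
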